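-- pv_equiv track=rewrite | github.com/cedarwud/ntn-stack | tools/powerpoint_generators/create_final_pptx.py | split_long_content
-- ===== SOURCE A (Python) =====
-- def estimate_content_lines(content_text):
--     """估算內容所需的行數"""
--     lines = content_text.split('\n')
--     total_lines = 0
--
--     for line in lines:
--         if not line.strip():  # 空行
--             total_lines += 1
--         else:
--             # 估算長行會自動換行的次數
--             # 假設每行最多 80 個字符（包含中英文）
--             char_count = len(line)
--             estimated_lines = max(1, (char_count + 79) // 80)
--             total_lines += estimated_lines
--
--     return total_lines
--
-- def split_long_content(content_text, max_lines=20):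
--     """將過長的內容分割成多個部分"""
--     if estimate_content_lines(content_text) <= max_lines:
--         return [content_text]
--
--     lines = content_text.split('\n')
--     parts = []
--     current_part = []
--     current_lines = 0
--
--     for line in lines:
--         line_count = max(1, (len(line) + 79) // 80) if line.strip() else 1
--
--         if current_lines + line_count > max_lines and current_part:
--             # 當前部分已滿，開始新部分
--             parts.append('\n'.join(current_part))
--             current_part = [line]
--             current_lines = line_count
--         else:
--             current_part.append(line)
--             current_lines += line_count
--
--     # 添加最後一部分
--     if current_part:
--         parts.append('\n'.join(current_part))
--
--     return parts
-- ===== SOURCE B (Python) =====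
-- def split_long_content(content_text, max_lines=20):
--     """Prefix-sum + binary-search splitter: build the array of cumulative
--     estimated line counts once, then locate each part's end index by binary
--     search on that array instead of accumulating/flushing line by line."""
--     lines = content_text.split('\n')
--     n = len(lines)
--     pref = [0]
--     total = 0
--     for line in lines:
--         total += max(1, (len(line) + 79) // 80) if line.strip() else 1
--         pref.append(total)
--     parts = []
--     i = 0
--     while i < n:
--         limit = pref[i] + max_lines
--         lo, hi = i + 1, n
--         while lo < hi:
--             mid = (lo + hi + 1) // 2
--             if pref[mid] <= limit:
--                 lo = mid
--             else:
--                 hi = mid - 1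
--         parts.append('\n'.join(lines[i:lo]))
--         i = lo
--     return parts
-- ===== Notes on version B (the rewrite author's own statement) =====
-- stated objective: alternative
-- what changed: Replaces A's estimate pre-scan plus accumulator/flush loop with a staged design: one pass builds a prefix-sum array of cumulative estimated line counts, then each part's end index is found by binary search on that array and the part is emitted as a slice join.
import Mathlib
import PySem

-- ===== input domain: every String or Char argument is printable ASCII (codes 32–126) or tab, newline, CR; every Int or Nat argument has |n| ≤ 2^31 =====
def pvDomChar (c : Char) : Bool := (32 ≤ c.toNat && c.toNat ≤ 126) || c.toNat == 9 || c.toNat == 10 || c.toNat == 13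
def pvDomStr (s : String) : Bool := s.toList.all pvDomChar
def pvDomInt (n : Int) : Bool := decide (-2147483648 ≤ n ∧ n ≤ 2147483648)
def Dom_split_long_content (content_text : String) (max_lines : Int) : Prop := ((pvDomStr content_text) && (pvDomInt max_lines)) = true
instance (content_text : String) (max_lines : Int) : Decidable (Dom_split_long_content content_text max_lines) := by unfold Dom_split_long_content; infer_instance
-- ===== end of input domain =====

-- B replaces A's estimate pre-scan + accumulator/flush loop by a staged design — a prefix-sum
-- array of cumulative line estimates built once, then each part's end found by binary search
-- on it ('alternative'); return values proved equal on all inputs.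

-- ===== PORT A =====
-- the per-line weight `max(1, (len(line) + 79) // 80) if line.strip() else 1`
def pvW (line : String) : Int :=
  if PySem.Str.strip line ≠ "" then max 1 (PySem.Int.floordiv (PySem.Str.len line + 79) 80) else 1

def estimate_content_lines (content_text : String) : Int :=
  -- sep "\n" is non-empty, so split? is always `some`; getD [] is never taken
  let lines := (PySem.Str.split? content_text "\n").getD []
  lines.foldl (fun total line =>
    if ¬ (PySem.Str.strip line ≠ "") then total + 1
    else total + max 1 (PySem.Int.floordiv (PySem.Str.len line + 79) 80)) 0

def split_long_content (content_text : String) (max_lines : Int) : List String :=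
  if estimate_content_lines content_text ≤ max_lines then [content_text]
  else
    let lines := (PySem.Str.split? content_text "\n").getD []
    let st := lines.foldl (fun (st : List String × List String × Int) line =>
      let line_count := pvW line
      if st.2.2 + line_count > max_lines ∧ st.2.1 ≠ [] then
        (st.1 ++ [PySem.Str.join "\n" st.2.1], [line], line_count)
      else
        (st.1, st.2.1 ++ [line], st.2.2 + line_count)) ([], [], 0)
    if st.2.1 ≠ [] then st.1 ++ [PySem.Str.join "\n" st.2.1] else st.1

-- ===== PORT B =====
-- Source B's inner `while lo < hi` binary search on the prefix array, with the
-- iteration bound `hi - lo` made explicit as structural fuel (each step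
-- strictly shrinks hi - lo, so the fuel is never exhausted). Python binds
-- `mid = (lo + hi + 1) // 2` once, here the same value is written inline.
-- `pref[mid]` is ported as getD (the index is always in range in Source B).
def pvBS (pref : List Int) (limit : Int) : Nat → Nat → Nat → Nat
  | 0, lo, _ => lo
  | fuel + 1, lo, hi =>
    if lo < hi then
      if pref.getD ((lo + hi + 1) / 2) 0 ≤ limit then
        pvBS pref limit fuel ((lo + hi + 1) / 2) hi
      else
        pvBS pref limit fuel lo ((lo + hi + 1) / 2 - 1)
    else lo

-- Source B's outer `while i < n` loop: emit lines[i:lo] and jump to lo; the loop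
-- bound `lines.length` is the structural fuel (i strictly increases each pass).
def pvChunksB (lines : List String) (pref : List Int) (max_lines : Int) : Nat → Nat → List String
  | 0, _ => []
  | fuel + 1, i =>
    if i < lines.length then
      PySem.Str.join "\n"
          (PySem.List.slice lines (some (i : Int))
            (some ((pvBS pref (pref.getD i 0 + max_lines) (lines.length - (i + 1)) (i + 1) lines.length : Nat) : Int)))
        :: pvChunksB lines pref max_lines fuel
            (pvBS pref (pref.getD i 0 + max_lines) (lines.length - (i + 1)) (i + 1) lines.length)
    else []

def split_long_content_alt (content_text : String) (max_lines : Int) : List String :=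
  let lines := (PySem.Str.split? content_text "\n").getD []
  -- pref = [0]; total = 0; for line: total += w; pref.append(total)
  let pref := (lines.foldl (fun (st : List Int × Int) line =>
      (st.1 ++ [st.2 + (if PySem.Str.strip line ≠ "" then max 1 (PySem.Int.floordiv (PySem.Str.len line + 79) 80) else 1)], st.2 + (if PySem.Str.strip line ≠ "" then max 1 (PySem.Int.floordiv (PySem.Str.len line + 79) 80) else 1))) ([0], 0)).1
  pvChunksB lines pref max_lines lines.length 0

-- ===== PRECONDITION & SPEC =====
def Spec_split_long_content (content_text : String) (max_lines : Int) (out : List String) : Prop := out = split_long_content_alt content_text max_lines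
instance (content_text : String) (max_lines : Int) (out : List String) : Decidable (Spec_split_long_content content_text max_lines out) := by unfold Spec_split_long_content; infer_instance

-- ===== CLAIM (what is proved, stated in full; the proofs are below) =====
def Claim_equal_split_long_content : Prop := ∀ (content_text : String) (max_lines : Int), Dom_split_long_content content_text max_lines → Spec_split_long_content content_text max_lines (split_long_content content_text max_lines)

-- ===== LEMMAS AND PROOFS =====

def pvSum (xs : List String) : Int := (xs.map pvW).sum

theorem pvW_ge_one (l : String) : 1 ≤ pvW l := by
  unfold pvW; split
  · exact le_max_left _ _
  · exact le_refl _

theorem pvSum_nonneg (xs : List String) : 0 ≤ pvSum xs :=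
  List.sum_nonneg (by
    intro x hx
    obtain ⟨l, _, rfl⟩ := List.mem_map.mp hx
    exact le_trans (by norm_num) (pvW_ge_one l))

theorem pvSum_append (xs ys : List String) : pvSum (xs ++ ys) = pvSum xs + pvSum ys := by
  simp [pvSum]

theorem pvSum_singleton (l : String) : pvSum [l] = pvW l := by simp [pvSum]

theorem pvSum_cons (l : String) (xs : List String) : pvSum (l :: xs) = pvW l + pvSum xs := by
  simp [pvSum]

-- estimate_content_lines sums the same per-line weights
theorem estimate_eq_pvSum (content_text : String) :
    estimate_content_lines content_text =
      pvSum ((PySem.Str.split? content_text "\n").getD []) := by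
  unfold estimate_content_lines
  generalize (PySem.Str.split? content_text "\n").getD [] = lines
  have h : ∀ (init : Int),
      lines.foldl (fun total line =>
        if ¬ (PySem.Str.strip line ≠ "") then total + 1
        else total + max 1 (PySem.Int.floordiv (PySem.Str.len line + 79) 80)) init
        = init + pvSum lines := by
    induction lines with
    | nil => intro init; simp [pvSum]
    | cons l rest ih =>
      intro init
      simp only [List.foldl_cons, ih, pvSum, List.map_cons, List.sum_cons, pvW]
      split_ifs with h1 <;> simp_all <;> ring
  simpa using h 0

-- ---- the greedy chunking both programs compute, as a recursion (proof-side only) ----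

def pvTake (max_lines total : Int) : List String → List String × List String
  | [] => ([], [])
  | l :: rest =>
    if total + pvW l ≤ max_lines then
      let p := pvTake max_lines (total + pvW l) rest
      (l :: p.1, p.2)
    else ([], l :: rest)

theorem pvTake_snd_length (max_lines total : Int) (xs : List String) :
    (pvTake max_lines total xs).2.length ≤ xs.length := by
  induction xs generalizing total with
  | nil => simp [pvTake]
  | cons l rest ih =>
    simp only [pvTake]
    split
    · exact le_trans (ih _) (Nat.le_succ _)
    · exact le_refl _

def pvChunks (max_lines : Int) : List String → List String
  | [] => []
  | l :: rest =>
    let p := pvTake max_lines (pvW l) rest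
    PySem.Str.join "\n" (l :: p.1) :: pvChunks max_lines p.2
termination_by xs => xs.length
decreasing_by
  exact Nat.lt_succ_of_le (pvTake_snd_length max_lines (pvW l) rest)

-- ---- A equals the greedy chunking ------------------------------------------------

theorem pvTake_full (max_lines total : Int) (xs : List String)
    (h : total + pvSum xs ≤ max_lines) : pvTake max_lines total xs = (xs, []) := by
  induction xs generalizing total with
  | nil => simp [pvTake]
  | cons l rest ih =>
    have hs : 0 ≤ pvSum rest := pvSum_nonneg rest
    have hsum : pvSum (l :: rest) = pvW l + pvSum rest := pvSum_cons l rest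
    have hle : total + pvW l ≤ max_lines := by rw [hsum] at h; omega
    have hrec : (total + pvW l) + pvSum rest ≤ max_lines := by rw [hsum] at h; omega
    simp [pvTake, hle, ih _ hrec]

theorem pvChunks_single (max_lines : Int) (l : String) (rest : List String)
    (h : pvSum (l :: rest) ≤ max_lines) :
    pvChunks max_lines (l :: rest) = [PySem.Str.join "\n" (l :: rest)] := by
  have hsum : pvSum (l :: rest) = pvW l + pvSum rest := pvSum_cons l rest
  have := pvTake_full max_lines (pvW l) rest (by rw [hsum] at h; omega)
  simp [pvChunks, this]

def pvBodyA (max_lines : Int) (st : List String × List String × Int) (line : String) :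
    List String × List String × Int :=
  let line_count := pvW line
  if st.2.2 + line_count > max_lines ∧ st.2.1 ≠ [] then
    (st.1 ++ [PySem.Str.join "\n" st.2.1], [line], line_count)
  else
    (st.1, st.2.1 ++ [line], st.2.2 + line_count)

def pvFin (st : List String × List String × Int) : List String :=
  if st.2.1 ≠ [] then st.1 ++ [PySem.Str.join "\n" st.2.1] else st.1

theorem loop_eq (max_lines : Int) (lines : List String) :
    ∀ (cur parts : List String), cur ≠ [] →
      pvFin (lines.foldl (pvBodyA max_lines) (parts, cur, pvSum cur)) =
        parts ++ (PySem.Str.join "\n" (cur ++ (pvTake max_lines (pvSum cur) lines).1) ::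
          pvChunks max_lines (pvTake max_lines (pvSum cur) lines).2) := by
  induction lines with
  | nil =>
    intro cur parts hcur
    simp [pvFin, pvTake, pvChunks, hcur]
  | cons l rest ih =>
    intro cur parts hcur
    by_cases hfit : pvSum cur + pvW l ≤ max_lines
    · have hbody : pvBodyA max_lines (parts, cur, pvSum cur) l
          = (parts, cur ++ [l], pvSum (cur ++ [l])) := by
        simp [pvBodyA, pvSum_append, pvSum_singleton]
        omega
      have htake : pvTake max_lines (pvSum cur) (l :: rest)
          = (l :: (pvTake max_lines (pvSum cur + pvW l) rest).1,
             (pvTake max_lines (pvSum cur + pvW l) rest).2) := by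
        simp [pvTake, hfit]
      rw [List.foldl_cons, hbody, ih (cur ++ [l]) parts (by simp), htake,
        pvSum_append, pvSum_singleton]
      simp
    · have hbody : pvBodyA max_lines (parts, cur, pvSum cur) l
          = (parts ++ [PySem.Str.join "\n" cur], [l], pvSum [l]) := by
        simp [pvBodyA, pvSum_singleton, hcur]
        omega
      have htake : pvTake max_lines (pvSum cur) (l :: rest) = ([], l :: rest) := by
        simp [pvTake]
        omega
      rw [List.foldl_cons, hbody, ih [l] _ (by simp), htake, pvSum_singleton]
      simp [pvChunks]

theorem loop_chunks (max_lines : Int) (l : String) (rest : List String) :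
    pvFin ((l :: rest).foldl (pvBodyA max_lines) ([], [], 0)) =
      pvChunks max_lines (l :: rest) := by
  have hfirst : pvBodyA max_lines ([], [], 0) l = ([], [l], pvSum [l]) := by
    simp [pvBodyA, pvSum_singleton]
  rw [List.foldl_cons, hfirst, loop_eq max_lines rest [l] [] (by simp), pvSum_singleton]
  simp [pvChunks]

-- ---- split / join round trip --------------------------------------------------

theorem splitOn_go_eq (c : Char) :
    ∀ (fuel : Nat) (l cur : List Char) (acc : List (List Char)), l.length < fuel →
      PySem.Chars.splitOn.go [c] fuel l cur acc =
        acc.reverse ++ (List.splitOnP (· == c) l).modifyHead (cur.reverse ++ ·) := by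
  intro fuel
  induction fuel with
  | zero => intro l cur acc h; omega
  | succ f ih =>
    intro l cur acc h
    cases l with
    | nil => simp [PySem.Chars.splitOn.go, List.splitOnP_nil]
    | cons ch rest =>
      by_cases hc : ch = c
      · subst hc
        have hpre : [ch].isPrefixOf (ch :: rest) = true := by simp [List.isPrefixOf]
        rw [PySem.Chars.splitOn.go, if_pos hpre]
        simp only [List.length_cons] at h
        rw [show List.drop [ch].length (ch :: rest) = rest by simp,
          ih rest [] (cur.reverse :: acc) (by omega)]
        simp [List.splitOnP_cons]
        rw [show (fun x : List Char => x) = id from rfl, List.modifyHead_id]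
        rfl
      · have hpre : [c].isPrefixOf (ch :: rest) = false := by
          simp [List.isPrefixOf, Ne.symm hc]
        rw [PySem.Chars.splitOn.go, if_neg (by simp [hpre])]
        simp only [List.length_cons] at h
        rw [ih rest (ch :: cur) acc (by omega)]
        rw [List.splitOnP_cons]
        simp only [beq_iff_eq, hc, ite_false]
        obtain ⟨h0, t0, hsplit⟩ := (List.splitOnP (· == c) rest).exists_cons_of_ne_nil
          (List.splitOnP_ne_nil _ rest)
        rw [hsplit]
        simp

theorem splitOn_eq (c : Char) (s : List Char) :
    PySem.Chars.splitOn s [c] = List.splitOnP (· == c) s := by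
  unfold PySem.Chars.splitOn
  rw [splitOn_go_eq c (s.length + 1) s [] [] (by omega)]
  obtain ⟨h0, t0, hsplit⟩ := (List.splitOnP (· == c) s).exists_cons_of_ne_nil
    (List.splitOnP_ne_nil _ s)
  rw [hsplit]; simp

theorem split_lines_eq (content_text : String) :
    (PySem.Str.split? content_text "\n").getD [] =
      (List.splitOnP (· == '\n') content_text.toList).map String.ofList := by
  have hsep : ("\n" : String).toList = ['\n'] := rfl
  simp [PySem.Str.split?, PySem.Chars.split?, hsep, splitOn_eq]

theorem split_lines_ne_nil (content_text : String) :
    (PySem.Str.split? content_text "\n").getD [] ≠ [] := by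
  rw [split_lines_eq]
  simp [List.splitOnP_ne_nil]

theorem join_split (content_text : String) :
    PySem.Str.join "\n" ((PySem.Str.split? content_text "\n").getD []) = content_text := by
  rw [split_lines_eq]
  have h : (PySem.Str.join "\n" ((List.splitOnP (· == '\n') content_text.toList).map
      String.ofList)).toList = content_text.toList := by
    rw [PySem.Str.toList_join]
    have hsep : ("\n" : String).toList = ['\n'] := rfl
    rw [hsep]
    have : (List.map String.toList ((List.splitOnP (· == '\n') content_text.toList).map
        String.ofList)) = List.splitOnP (· == '\n') content_text.toList := by
      rw [List.map_map]
      exact List.map_id'' (by intro x; simp) _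
    rw [this]
    show ['\n'].intercalate _ = _
    rw [← List.splitOn] at *
    exact List.intercalate_splitOn _ '\n'
  exact String.toList_inj.mp h

theorem A_eq_chunks (content_text : String) (max_lines : Int) :
    split_long_content content_text max_lines =
      pvChunks max_lines ((PySem.Str.split? content_text "\n").getD []) := by
  unfold split_long_content
  obtain ⟨l, rest, hlines⟩ := List.exists_cons_of_ne_nil (split_lines_ne_nil content_text)
  by_cases hle : estimate_content_lines content_text ≤ max_lines
  · rw [if_pos hle]
    have hsum : pvSum ((PySem.Str.split? content_text "\n").getD []) ≤ max_lines := by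
      rw [← estimate_eq_pvSum]; exact hle
    rw [hlines] at hsum ⊢
    rw [pvChunks_single max_lines l rest hsum, ← hlines, join_split]
  · rw [if_neg hle]
    show pvFin _ = _
    rw [hlines]
    exact loop_chunks max_lines l rest

-- ---- B equals the greedy chunking ------------------------------------------------

def prefArr (lines : List String) : List Int :=
  (lines.foldl (fun (st : List Int × Int) line =>
      (st.1 ++ [st.2 + (if PySem.Str.strip line ≠ "" then max 1 (PySem.Int.floordiv (PySem.Str.len line + 79) 80) else 1)], st.2 + (if PySem.Str.strip line ≠ "" then max 1 (PySem.Int.floordiv (PySem.Str.len line + 79) 80) else 1))) ([0], 0)).1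

theorem foldl_pref (lines : List String) :
    ∀ (acc : List Int) (t : Int),
      lines.foldl (fun (st : List Int × Int) line =>
          (st.1 ++ [st.2 + (if PySem.Str.strip line ≠ "" then max 1 (PySem.Int.floordiv (PySem.Str.len line + 79) 80) else 1)], st.2 + (if PySem.Str.strip line ≠ "" then max 1 (PySem.Int.floordiv (PySem.Str.len line + 79) 80) else 1))) (acc, t)
        = (acc ++ (List.range lines.length).map (fun m => t + pvSum (lines.take (m+1))),
           t + pvSum lines) := by
  have hfun : (fun (st : List Int × Int) line =>
      (st.1 ++ [st.2 + (if PySem.Str.strip line ≠ "" then max 1 (PySem.Int.floordiv (PySem.Str.len line + 79) 80) else 1)], st.2 + (if PySem.Str.strip line ≠ "" then max 1 (PySem.Int.floordiv (PySem.Str.len line + 79) 80) else 1)))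
      = (fun (st : List Int × Int) line => (st.1 ++ [st.2 + pvW line], st.2 + pvW line)) := rfl
  rw [hfun]
  induction lines with
  | nil => intro acc t; simp [pvSum]
  | cons l rest ih =>
    intro acc t
    simp only [List.foldl_cons]
    rw [ih (acc ++ [t + pvW l]) (t + pvW l)]
    have hmap : (List.range (rest.length + 1)).map
        (fun m => t + pvSum ((l :: rest).take (m+1)))
        = (t + pvW l) :: (List.range rest.length).map
            (fun m => (t + pvW l) + pvSum (rest.take (m+1))) := by
      rw [List.range_succ_eq_map, List.map_cons, List.map_map]
      refine congrArg₂ _ ?_ ?_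
      · simp [List.take_succ_cons, pvSum]
      · refine List.map_congr_left (fun m _ => ?_)
        simp only [Function.comp_apply, List.take_succ_cons, pvSum_cons]
        ring
    simp only [List.length_cons, hmap, pvSum_cons]
    rw [List.append_assoc, List.singleton_append]
    refine congrArg₂ _ rfl ?_
    ring

theorem pref_getD (lines : List String) (k : Nat) (hk : k ≤ lines.length) :
    (prefArr lines).getD k 0 = pvSum (lines.take k) := by
  unfold prefArr
  rw [foldl_pref lines [0] 0]
  cases k with
  | zero => simp [pvSum]
  | succ m =>
    rw [List.singleton_append, List.getD_cons_succ,
      List.getD_eq_getElem?_getD, List.getElem?_map, List.getElem?_range (by omega : m < lines.length)]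
    simp

theorem pvSum_take_mono (xs : List String) (a b : Nat) (hab : a ≤ b) :
    pvSum (xs.take a) ≤ pvSum (xs.take b) := by
  have h1 : xs.take a = (xs.take b).take a := by rw [List.take_take, min_eq_left hab]
  have h2 := pvSum_nonneg ((xs.take b).drop a)
  have h3 : pvSum ((xs.take b).take a) + pvSum ((xs.take b).drop a) = pvSum (xs.take b) := by
    rw [← pvSum_append, List.take_append_drop]
  rw [h1]; omega

theorem pvBS_spec (pref : List Int) (limit : Int) :
    ∀ (n lo hi : Nat), hi - lo ≤ n → lo ≤ hi →
      lo ≤ pvBS pref limit n lo hi ∧ pvBS pref limit n lo hi ≤ hi ∧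
      (pvBS pref limit n lo hi = lo ∨ pref.getD (pvBS pref limit n lo hi) 0 ≤ limit) ∧
      (pvBS pref limit n lo hi = hi ∨ ¬ pref.getD (pvBS pref limit n lo hi + 1) 0 ≤ limit) := by
  intro n
  induction n with
  | zero =>
    intro lo hi h hle
    have hlohi : lo = hi := by omega
    exact ⟨le_rfl, hle, Or.inl rfl, Or.inl hlohi⟩
  | succ n ih =>
    intro lo hi h hle
    rw [pvBS]
    by_cases hlt : lo < hi
    · rw [if_pos hlt]
      split_ifs with hmid
      · obtain ⟨ha, hb, hc, hd⟩ := ih ((lo+hi+1)/2) hi (by omega) (by omega)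
        refine ⟨by omega, hb, ?_, hd⟩
        rcases hc with hc | hc
        · exact Or.inr (by rw [hc]; exact hmid)
        · exact Or.inr hc
      · obtain ⟨ha, hb, hc, hd⟩ := ih lo ((lo+hi+1)/2 - 1) (by omega) (by omega)
        refine ⟨ha, by omega, hc, ?_⟩
        rcases hd with hd | hd
        · refine Or.inr ?_
          rw [hd, show (lo+hi+1)/2 - 1 + 1 = (lo+hi+1)/2 by omega]
          exact hmid
        · exact Or.inr hd
    · rw [if_neg hlt]
      exact ⟨le_rfl, hle, Or.inl rfl, Or.inl (by omega)⟩

-- the length of the prefix pvTake consumes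
def pvK (m t : Int) : List String → Nat
  | [] => 0
  | l :: rest => if t + pvW l ≤ m then pvK m (t + pvW l) rest + 1 else 0

theorem pvTake_eq (m : Int) (xs : List String) :
    ∀ t, pvTake m t xs = (xs.take (pvK m t xs), xs.drop (pvK m t xs)) := by
  induction xs with
  | nil => intro t; simp [pvTake, pvK]
  | cons l rest ih =>
    intro t
    by_cases hfit : t + pvW l ≤ m
    · simp [pvTake, pvK, hfit, ih (t + pvW l), List.take_succ_cons, List.drop_succ_cons]
    · simp [pvTake, pvK, hfit]

theorem pvK_le (m t : Int) (xs : List String) : pvK m t xs ≤ xs.length := by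
  induction xs generalizing t with
  | nil => simp [pvK]
  | cons l rest ih =>
    simp only [pvK, List.length_cons]
    split
    · exact Nat.succ_le_succ (ih _)
    · omega

theorem pvK_feas (m t : Int) (xs : List String) :
    pvK m t xs = 0 ∨ t + pvSum (xs.take (pvK m t xs)) ≤ m := by
  induction xs generalizing t with
  | nil => exact Or.inl rfl
  | cons l rest ih =>
    by_cases hfit : t + pvW l ≤ m
    · refine Or.inr ?_
      simp only [pvK, if_pos hfit, List.take_succ_cons, pvSum_cons]
      rcases ih (t + pvW l) with h0 | hf
      · rw [h0]; simp [pvSum]; omega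
      · omega
    · simp [pvK, hfit]

theorem pvK_max (m t : Int) (xs : List String) :
    pvK m t xs = xs.length ∨ ¬ (t + pvSum (xs.take (pvK m t xs + 1)) ≤ m) := by
  induction xs generalizing t with
  | nil => exact Or.inl rfl
  | cons l rest ih =>
    by_cases hfit : t + pvW l ≤ m
    · simp only [pvK, if_pos hfit, List.length_cons]
      rcases ih (t + pvW l) with h0 | hm
      · exact Or.inl (by omega)
      · refine Or.inr ?_
        rw [show pvK m (t + pvW l) rest + 1 + 1 = (pvK m (t + pvW l) rest + 1) + 1 from rfl,
          List.take_succ_cons, pvSum_cons]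
        omega
    · refine Or.inr ?_
      simp only [pvK, if_neg hfit, Nat.zero_add, List.take_succ_cons, List.take_zero, pvSum_cons]
      simp [pvSum]
      omega

theorem char_lt_absurd (P : Nat → Prop) (lo hi j1 j2 : Nat)
    (hdown : ∀ a b, lo ≤ a → a ≤ b → b ≤ hi → P b → P a)
    (h1 : lo ≤ j1 ∧ j1 ≤ hi ∧ (j1 = lo ∨ P j1) ∧ (j1 = hi ∨ ¬ P (j1+1)))
    (h2 : lo ≤ j2 ∧ j2 ≤ hi ∧ (j2 = lo ∨ P j2) ∧ (j2 = hi ∨ ¬ P (j2+1)))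
    (hlt : j1 < j2) : False := by
  obtain ⟨h1a, h1b, h1c, h1d⟩ := h1
  obtain ⟨h2a, h2b, h2c, h2d⟩ := h2
  have hP2 : P j2 := by
    rcases h2c with h | h
    · omega
    · exact h
  have hnd : ¬ P (j1+1) := by
    rcases h1d with h | h
    · omega
    · exact h
  exact hnd (hdown (j1+1) j2 (by omega) (by omega) h2b hP2)

theorem char_unique (P : Nat → Prop) (lo hi j1 j2 : Nat)
    (hdown : ∀ a b, lo ≤ a → a ≤ b → b ≤ hi → P b → P a)
    (h1 : lo ≤ j1 ∧ j1 ≤ hi ∧ (j1 = lo ∨ P j1) ∧ (j1 = hi ∨ ¬ P (j1+1)))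
    (h2 : lo ≤ j2 ∧ j2 ≤ hi ∧ (j2 = lo ∨ P j2) ∧ (j2 = hi ∨ ¬ P (j2+1))) : j1 = j2 := by
  rcases Nat.lt_trichotomy j1 j2 with h | h | h
  · exact absurd (char_lt_absurd P lo hi j1 j2 hdown h1 h2 h) not_false
  · exact h
  · exact absurd (char_lt_absurd P lo hi j2 j1 hdown h2 h1 h) not_false

theorem chunksB_eq_aux (ml : Int) (lines : List String) :
    ∀ (fuel i : Nat), lines.length - i ≤ fuel →
      pvChunksB lines (prefArr lines) ml fuel i = pvChunks ml (lines.drop i) := by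
  intro fuel
  induction fuel with
  | zero =>
    intro i h
    rw [List.drop_eq_nil_of_le (by omega)]
    simp [pvChunksB, pvChunks]
  | succ fuel ih =>
    intro i h
    by_cases hlt : i < lines.length
    · have hln : lines.drop i = lines[i] :: lines.drop (i+1) := List.drop_eq_getElem_cons hlt
      obtain ⟨l, hl⟩ : ∃ x, lines.drop i = x :: lines.drop (i+1) := ⟨_, hln⟩
      rw [pvChunksB, if_pos hlt]
      set rest := lines.drop (i+1) with hrest
      have hrl : rest.length = lines.length - (i+1) := by rw [hrest, List.length_drop]
      have hkle := pvK_le ml (pvW l) rest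
      set k := pvK ml (pvW l) rest with hk
      have hgd : ∀ q, q ≤ lines.length → (prefArr lines).getD q 0 = pvSum (lines.take q) :=
        fun q hq => pref_getD lines q hq
      have hdec : ∀ k', i+1+k' ≤ lines.length →
          pvSum (lines.take (i+1+k')) = pvSum (lines.take i) + (pvW l + pvSum (rest.take k')) := by
        intro k' hk'
        rw [show i+1+k' = i+(1+k') by omega, List.take_add, pvSum_append, hl,
          show 1+k' = k'+1 by omega, List.take_succ_cons, pvSum_cons]
      have hdown : ∀ a b, i+1 ≤ a → a ≤ b → b ≤ lines.length →
          ((prefArr lines).getD b 0 ≤ (prefArr lines).getD i 0 + ml) →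
          (prefArr lines).getD a 0 ≤ (prefArr lines).getD i 0 + ml := by
        intro a b ha hab hb hPb
        have h2 := pvSum_take_mono lines a b hab
        rw [hgd b hb] at hPb
        rw [hgd a (by omega)]
        omega
      have hspec := pvBS_spec (prefArr lines) ((prefArr lines).getD i 0 + ml)
        (lines.length - (i+1)) (i+1) lines.length le_rfl (by omega)
      have hchar2 : i+1 ≤ i+1+k ∧ i+1+k ≤ lines.length ∧
          (i+1+k = i+1 ∨ (prefArr lines).getD (i+1+k) 0 ≤ (prefArr lines).getD i 0 + ml) ∧
          (i+1+k = lines.length ∨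
            ¬ (prefArr lines).getD (i+1+k+1) 0 ≤ (prefArr lines).getD i 0 + ml) := by
      
        refine ⟨by omega, by omega, ?_, ?_⟩
        · rcases pvK_feas ml (pvW l) rest with h0 | hf
          · rw [← hk] at h0
            exact Or.inl (by omega)
          · rw [← hk] at hf
            refine Or.inr ?_
            rw [hgd (i+1+k) (by omega), hdec k (by omega), hgd i (by omega)]
            omega
        · by_cases hkend : k = rest.length
          · exact Or.inl (by omega)
          · refine Or.inr ?_
            rcases pvK_max ml (pvW l) rest with h0 | hm
            · exact absurd h0 (by rw [← hk]; exact hkend)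
            · rw [← hk] at hm
              rw [show i+1+k+1 = i+1+(k+1) by omega, hgd (i+1+(k+1)) (by omega),
                hdec (k+1) (by omega), hgd i (by omega)]
              omega
      have hjk : pvBS (prefArr lines) ((prefArr lines).getD i 0 + ml)
          (lines.length - (i+1)) (i+1) lines.length = i+1+k :=
        char_unique (fun q => (prefArr lines).getD q 0 ≤ (prefArr lines).getD i 0 + ml)
          (i+1) lines.length _ (i+1+k) hdown hspec hchar2
      rw [hjk]
      have hslice : PySem.List.slice lines (some (i : Int)) (some ((↑(i+1+k) : Int)))
          = l :: rest.take k := by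
        rw [PySem.List.slice_natCast, show i+1+k-i = k+1 by omega, hl, List.take_succ_cons]
      have hdropj : lines.drop (i+1+k) = rest.drop k := by
        rw [hrest, List.drop_drop, show i+1+k = (i+1)+k by omega, Nat.add_comm (i+1) k]
      rw [hslice, ih (i+1+k) (by omega), hdropj, hl]
      have hRHS : pvChunks ml (l :: rest)
          = PySem.Str.join "\n" (l :: (pvTake ml (pvW l) rest).1)
              :: pvChunks ml (pvTake ml (pvW l) rest).2 := by
        simp [pvChunks]
      rw [hRHS, pvTake_eq ml rest (pvW l), ← hk]
    · rw [pvChunksB, if_neg hlt, List.drop_eq_nil_of_le (by omega)]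
      simp [pvChunks]

theorem B_eq_chunks (content_text : String) (max_lines : Int) :
    split_long_content_alt content_text max_lines =
      pvChunks max_lines ((PySem.Str.split? content_text "\n").getD []) := by
  have h0 : split_long_content_alt content_text max_lines
      = pvChunksB ((PySem.Str.split? content_text "\n").getD [])
          (prefArr ((PySem.Str.split? content_text "\n").getD []))
          max_lines ((PySem.Str.split? content_text "\n").getD []).length 0 := rfl
  rw [h0, chunksB_eq_aux max_lines _ ((PySem.Str.split? content_text "\n").getD []).length 0
    (by omega), List.drop_zero]

-- ===== VERDICT (by name: the statement is the Claim_ definition above) =====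
theorem split_long_content_spec : Claim_equal_split_long_content := by
  intro content_text max_lines _
  unfold Spec_split_long_content
  rw [A_eq_chunks, B_eq_chunks]
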